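-- pv_equiv track=rewrite | github.com/chuksoo/CodeMasters | TIP102 - Intermediate Technical Interview Prep/Unit 2 practice.py | organize_exhibition
-- ===== SOURCE A (Python) =====
-- def organize_exhibition(collection):
--     from collections import Counter
--     collections_map = Counter(collection)
--     max_rows = max(collections_map.values())
--     result = [[] for _ in range(max_rows)]
--
--     for item, count in collections_map.items():
--         for i in range(count):
--             result[i].append(item)
--     return result
-- ===== SOURCE B (Python) =====
-- def organize_exhibition(collection):
--     from collections import Counter
--     counter = Counter(collection)
--     max_rows = max(counter.values())
--     result = []
--     survivors = list(counter.items())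
--     for i in range(max_rows):
--         survivors = [(item, c) for item, c in survivors if c > i]
--         result.append([item for item, _ in survivors])
--     return result
-- ===== Notes on version B (the rewrite author's own statement) =====
-- stated objective: alternative
-- what changed: Replaced the item-outer/copy-inner double loop that mutates a preallocated list of rows by index with a row-outer loop that builds each row directly by filtering the surviving (item, count) pairs with count > row index.
import Mathlib
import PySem

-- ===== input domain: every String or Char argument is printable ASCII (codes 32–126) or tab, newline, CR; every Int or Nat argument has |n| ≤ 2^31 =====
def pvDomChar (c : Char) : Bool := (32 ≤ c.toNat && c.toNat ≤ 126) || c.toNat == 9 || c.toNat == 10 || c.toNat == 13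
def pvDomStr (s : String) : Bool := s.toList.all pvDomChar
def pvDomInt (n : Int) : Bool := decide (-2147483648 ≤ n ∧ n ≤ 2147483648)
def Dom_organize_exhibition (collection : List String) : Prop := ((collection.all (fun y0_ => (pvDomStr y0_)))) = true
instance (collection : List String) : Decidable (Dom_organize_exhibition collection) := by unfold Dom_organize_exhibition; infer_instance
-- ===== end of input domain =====

-- B replaces A's item-outer/copy-inner index-mutating double loop by a row-outer
-- pass that keeps the surviving (item, count) pairs and filters them once per row
-- (objective: alternative decomposition at the same O(n) cost).

-- ===== PORT A =====
-- result[i].append(item): i comes from range(count) with 1 ≤ count ≤ max_rows, so it is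
-- always a valid nonnegative index; ported exactly as List.set/getD at i.toNat.
def organize_exhibition (collection : List String) : List (List String) :=
  let collections_map := PySem.Dict.counter collection
  match PySem.List.max? collections_map.values (fun v => v) with
  | none => []          -- unreachable under Pre_: max() of an empty sequence raises ValueError
  | some max_rows =>
    let result := List.replicate max_rows.toNat ([] : List String)
    collections_map.items.foldl
      (fun result p =>
        (PySem.List.pyRange 0 p.2).foldl
          (fun result i => result.set i.toNat ((result.getD i.toNat []) ++ [p.1]))
          result)
      result

-- ===== PORT B =====
def organize_exhibition_alt (collection : List String) : List (List String) :=
  let counter := PySem.Dict.counter collection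
  match PySem.List.max? counter.values (fun v => v) with
  | none => []          -- unreachable under Pre_: max() of an empty sequence raises ValueError
  | some max_rows =>
    ((PySem.List.pyRange 0 max_rows).foldl
      (fun (st : List (List String) × List (String × Int)) i =>
        let survivors := st.2.filter (fun p => decide (i < p.2))
        (st.1 ++ [survivors.map Prod.fst], survivors))
      ([], counter.items)).1

-- ===== PRECONDITION & SPEC =====
-- On the empty list max() of an empty sequence raises ValueError, in A and in B alike.
def Pre_organize_exhibition (collection : List String) : Prop := collection ≠ []
instance (collection : List String) : Decidable (Pre_organize_exhibition collection) := by
  unfold Pre_organize_exhibition; infer_instance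

def pvWitness_organize_exhibition : List String := ["a", "b", "a"]

def Spec_organize_exhibition (collection : List String) (out : List (List String)) : Prop :=
  out = organize_exhibition_alt collection
instance (collection : List String) (out : List (List String)) : Decidable (Spec_organize_exhibition collection out) := by
  unfold Spec_organize_exhibition; infer_instance

-- ===== CLAIM (what is proved, stated in full; the proofs are below) =====
def Claim_equal_organize_exhibition : Prop := ∀ (collection : List String), Dom_organize_exhibition collection → Pre_organize_exhibition collection → Spec_organize_exhibition collection (organize_exhibition collection)

-- ===== LEMMAS AND PROOFS =====

-- A's inner loop over range(cnt) on Nat indices: append `a` to the first n rows.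
theorem setfold_nat (a : String) (n : Nat) (res : List (List String))
    (h : n ≤ res.length) :
    (List.range n).foldl (fun r k => r.set k ((r.getD k []) ++ [a])) res
    = res.mapIdx (fun j row => if j < n then row ++ [a] else row) := by
  induction n with
  | zero =>
    apply List.ext_getElem <;> simp [List.getElem_mapIdx]
  | succ n ih =>
    rw [List.range_succ, List.foldl_append, ih (by omega)]
    simp only [List.foldl_cons, List.foldl_nil]
    apply List.ext_getElem
    · simp
    · intro i h1 h2
      simp only [List.getElem_set, List.getElem_mapIdx] at *
      have hgetD : (List.mapIdx (fun j row => if j < n then row ++ [a] else row) res).getD n []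
          = res[n]'(by omega) := by
        rw [List.getD_eq_getElem _ _ (by simp; omega)]
        simp [List.getElem_mapIdx]
      simp only [hgetD]
      by_cases hin : n = i
      · subst hin; simp
      · rw [if_neg hin]
        have hiff : (i < n) ↔ (i < n + 1) := by omega
        simp [hiff]

-- A's inner loop as written (Int indices from pyRange), for a nonnegative count in range.
theorem innerLoop_set (a : String) (cnt : Int) (res : List (List String))
    (hc : 0 ≤ cnt) (hle : cnt.toNat ≤ res.length) :
    (PySem.List.pyRange 0 cnt).foldl
      (fun result i => result.set i.toNat ((result.getD i.toNat []) ++ [a])) res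
    = res.mapIdx (fun j row => if (j : Int) < cnt then row ++ [a] else row) := by
  have hcast : cnt = ((cnt.toNat : Nat) : Int) := by omega
  rw [hcast, PySem.List.pyRange_zero_natCast, List.foldl_map]
  simp only [Int.toNat_natCast]
  rw [setfold_nat a cnt.toNat res hle]
  congr 1
  funext j row
  by_cases hj : j < cnt.toNat
  · rw [if_pos hj, if_pos (by exact_mod_cast hj)]
  · rw [if_neg hj, if_neg (by omega)]

-- A's outer loop, entrywise: row j collects the items whose count exceeds j.
theorem outerLoop (L : List (String × Int)) (res : List (List String))
    (hle : ∀ p ∈ L, 0 ≤ p.2 ∧ p.2.toNat ≤ res.length) :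
    L.foldl
      (fun result p =>
        (PySem.List.pyRange 0 p.2).foldl
          (fun result i => result.set i.toNat ((result.getD i.toNat []) ++ [p.1])) result)
      res
    = res.mapIdx (fun j row => row ++ ((L.filter (fun p => decide ((j : Int) < p.2))).map Prod.fst)) := by
  induction L generalizing res with
  | nil =>
    apply List.ext_getElem <;> simp [List.getElem_mapIdx]
  | cons p L ih =>
    simp only [List.foldl_cons]
    rw [innerLoop_set p.1 p.2 res (hle p (by simp)).1 (hle p (by simp)).2]
    rw [ih _ (by intro q hq
                 refine ⟨(hle q (by simp [hq])).1, ?_⟩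
                 rw [List.length_mapIdx]
                 exact (hle q (by simp [hq])).2)]
    rw [List.mapIdx_mapIdx]
    congr 1
    funext j row
    simp only [Function.comp, List.filter_cons]
    by_cases hj : (j : Int) < p.2
    · simp [hj]
    · simp [hj]

-- Every count stored by Counter(collection) is positive.
theorem counter_items_pos (collection : List String) :
    ∀ p ∈ (PySem.Dict.counter collection).items, 0 < p.2 := by
  intro p hp
  rw [PySem.Dict.items_counter] at hp
  obtain ⟨k, hk, rfl⟩ := List.mem_map.mp hp
  have : k ∈ collection := (PySem.Set.mem_ofList collection k).mp hk
  have := List.count_pos_iff.mpr this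
  simp
  omega

-- B's loop: after n rounds the survivors are the pairs with count ≥ n and the rows
-- collected so far are the per-row filters of the original pair list.
theorem survFold (L : List (String × Int)) (hpos : ∀ p ∈ L, 0 ≤ p.2)
    (n : Nat) (acc : List (List String)) :
    (List.range n).foldl
      (fun (st : List (List String) × List (String × Int)) k =>
        let survivors := st.2.filter (fun p => decide (((k : Nat) : Int) < p.2))
        (st.1 ++ [survivors.map Prod.fst], survivors))
      (acc, L)
    = (acc ++ (List.range n).map
          (fun k => (L.filter (fun p => decide (((k : Nat) : Int) < p.2))).map Prod.fst),
       L.filter (fun p => decide (((n : Nat) : Int) ≤ p.2))) := by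
  induction n with
  | zero =>
    simp only [List.range_zero, List.foldl_nil, List.map_nil, List.append_nil]
    rw [List.filter_eq_self.mpr (by intro p hp; simpa using hpos p hp)]
  | succ n ih =>
    rw [List.range_succ, List.foldl_append, ih]
    simp only [List.foldl_cons, List.foldl_nil, List.filter_filter]
    have hfil : L.filter (fun p => decide (((n : Nat) : Int) < p.2) && decide (((n : Nat) : Int) ≤ p.2))
        = L.filter (fun p => decide ((((n + 1 : Nat)) : Int) ≤ p.2)) := by
      apply List.filter_congr
      intro p _
      rw [Bool.eq_iff_iff]
      simp only [Bool.and_eq_true, decide_eq_true_eq]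
      push_cast
      omega
    rw [hfil]
    simp [List.map_append]

-- ===== VERDICT (by name: the statement is the Claim_ definition above) =====
theorem organize_exhibition_spec : Claim_equal_organize_exhibition := by
  intro collection _ hpre
  unfold Spec_organize_exhibition
  obtain ⟨x, xs, rfl⟩ := List.exists_cons_of_ne_nil hpre
  set coll := x :: xs with hcoll
  have hvals : (PySem.Dict.counter coll).values ≠ [] := by
    have hx : (x, ((coll.count x : Nat) : Int)) ∈ (PySem.Dict.counter coll).items := by
      rw [PySem.Dict.items_counter]
      exact List.mem_map_of_mem ((PySem.Set.mem_ofList coll x).mpr (by simp [hcoll]))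
    intro hnil
    have : ((coll.count x : Nat) : Int) ∈ (PySem.Dict.counter coll).values :=
      List.mem_map_of_mem (f := Prod.snd) hx
    rw [hnil] at this
    exact absurd this (List.not_mem_nil)
  cases hmax : PySem.List.max? (PySem.Dict.counter coll).values (fun v => v) with
  | none => exact absurd ((PySem.List.max?_eq_none_iff _ _).mp hmax) hvals
  | some M =>
    have hMpos : 0 < M := by
      obtain ⟨p, hp, rfl⟩ := List.mem_map.mp (PySem.List.max?_mem hmax)
      exact counter_items_pos coll p hp
    have hmaxle : ∀ p ∈ (PySem.Dict.counter coll).items, p.2 ≤ M := by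
      intro p hp
      exact PySem.List.max?_isMax hmax p.2 (List.mem_map_of_mem hp)
    unfold organize_exhibition organize_exhibition_alt
    simp only [hmax]
    rw [outerLoop _ _ (by
      intro p hp
      refine ⟨le_of_lt (counter_items_pos coll p hp), ?_⟩
      rw [List.length_replicate]
      have := hmaxle p hp
      omega)]
    have hMcast : M = ((M.toNat : Nat) : Int) := by omega
    rw [hMcast, PySem.List.pyRange_zero_natCast, List.foldl_map]
    rw [survFold _ (fun p hp => le_of_lt (counter_items_pos coll p hp)) M.toNat []]
    simp only [List.nil_append]
    apply List.ext_getElem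
    · simp; omega
    · intro i h1 h2
      simp [List.getElem_mapIdx]
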